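-- pv_equiv track=rewrite | github.com/itsarvindhere/Stack | 074. Create Maximum Number/MaximumNumber.py | isGreater
-- ===== SOURCE A (Python) =====
-- def isGreater(nums1, nums2, i, j):
--
--     # Length of first list
--     m = len(nums1)
--
--     # Length of second list
--     n = len(nums2)
--
--     # While Loop to compare by positions
--     while i < m or j < n:
--
--         # If indices go out of bounds
--
--         # If i is >= m, then nums1 is not lexicographically greater than nums2
--         if i >= m: return False
--
--         # If j is >= n, then nums1 is lexicographically greater than nums2
--         elif j >= n: return True
--
--         # If indices are not out of bounds, we can compare the elements
--
--         # If "i" element in nums1 is greater than "j" element in nums2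
--         # Then nums1 is lexicographically greater than nums2
--         elif nums1[i] > nums2[j]: return True
--
--         # If "i" element in nums1 is smaller than "j" element in nums2
--         # Then nums1 is not lexicographically greater than nums2
--         elif nums1[i] < nums2[j]: return False
--
--         # If both are equal, move on to next comparison
--         i += 1
--         j += 1
--
--     # If we didn't return anything, then both subarrays are the same
--     # So we can return either True or False since we can choose any of the two
--     # Let's return true
--     return True
-- ===== SOURCE B (Python) =====
-- def isGreater(nums1, nums2, i, j):
--     return nums1[i:] >= nums2[j:]
-- ===== Notes on version B (the rewrite author's own statement) =====
-- stated objective: simpler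
-- what changed: The explicit index-by-index while loop is replaced by a single built-in lexicographic slice comparison nums1[i:] >= nums2[j:].
-- outside the precondition, e.g. on isGreater([9, 1], [1, 9, 0], -1, 0): A returns True, B returns False; on isGreater([1], [2], -5, 0): A raises IndexError, B returns False
import Mathlib
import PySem

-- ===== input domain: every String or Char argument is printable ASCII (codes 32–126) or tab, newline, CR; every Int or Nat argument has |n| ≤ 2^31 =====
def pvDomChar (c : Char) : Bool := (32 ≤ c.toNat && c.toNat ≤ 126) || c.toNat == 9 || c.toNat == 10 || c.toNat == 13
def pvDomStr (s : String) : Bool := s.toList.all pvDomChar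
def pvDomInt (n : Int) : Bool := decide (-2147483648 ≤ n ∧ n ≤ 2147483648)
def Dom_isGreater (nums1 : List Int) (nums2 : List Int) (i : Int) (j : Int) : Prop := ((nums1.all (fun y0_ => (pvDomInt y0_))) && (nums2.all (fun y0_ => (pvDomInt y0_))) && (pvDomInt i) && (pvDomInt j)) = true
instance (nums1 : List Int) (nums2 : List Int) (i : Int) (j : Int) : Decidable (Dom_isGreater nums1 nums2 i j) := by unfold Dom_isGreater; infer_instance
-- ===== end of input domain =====

-- B replaces A's index-by-index while loop with a single lexicographic comparison of the
-- two suffixes (Python: nums1[i:] >= nums2[j:]); objective: simpler. Equivalence is claimed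
-- for non-negative offsets i, j (see Pre_isGreater).

-- ===== PORT A =====
-- the while loop of A, with m/n the lengths; pyGet? none (Python IndexError) is outside Pre_
def isGreaterLoop (nums1 : List Int) (nums2 : List Int) (m n : Int) (i j : Int) : Bool :=
  if i < m ∨ j < n then
    if _hi : i ≥ m then false
    else if j ≥ n then true
    else
      match PySem.List.pyGet? nums1 i, PySem.List.pyGet? nums2 j with
      | some a, some b =>
          if a > b then true
          else if a < b then false
          else isGreaterLoop nums1 nums2 m n (i + 1) (j + 1)
      | _, _ => false      -- unreachable under Pre_ (Python raises IndexError here)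
  else true
termination_by (m - i).toNat
decreasing_by omega

def isGreater (nums1 : List Int) (nums2 : List Int) (i : Int) (j : Int) : Bool :=
  isGreaterLoop nums1 nums2 nums1.length nums2.length i j

-- ===== PORT B =====
-- Python's built-in list >= (lexicographic, a prefix is smaller)
def listGE : List Int → List Int → Bool
  | _, [] => true
  | [], _ :: _ => false
  | a :: as, b :: bs => if a > b then true else if a < b then false else listGE as bs

def isGreater_alt (nums1 : List Int) (nums2 : List Int) (i : Int) (j : Int) : Bool :=
  listGE (PySem.List.slice nums1 (some i) none) (PySem.List.slice nums2 (some j) none)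

-- ===== PRECONDITION & SPEC =====
-- Pre_ excludes negative offsets i or j, on which A either raises IndexError (offset below -len)
-- or accidentally restarts the comparison at the front via Python negative-index wraparound,
-- a defensible-corner artefact of A's indexing; B applies suffix-slice semantics there.
def Pre_isGreater (nums1 : List Int) (nums2 : List Int) (i : Int) (j : Int) : Prop :=
  0 ≤ i ∧ 0 ≤ j
instance (nums1 : List Int) (nums2 : List Int) (i : Int) (j : Int) : Decidable (Pre_isGreater nums1 nums2 i j) := by unfold Pre_isGreater; infer_instance

def pvWitness_isGreater : List Int × List Int × Int × Int := ([1, 2], [1], 0, 0)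

def Spec_isGreater (nums1 : List Int) (nums2 : List Int) (i : Int) (j : Int) (out : Bool) : Prop := out = isGreater_alt nums1 nums2 i j
instance (nums1 : List Int) (nums2 : List Int) (i : Int) (j : Int) (out : Bool) : Decidable (Spec_isGreater nums1 nums2 i j out) := by unfold Spec_isGreater; infer_instance

-- ===== CLAIM (what is proved, stated in full; the proofs are below) =====
def Claim_equal_isGreater : Prop := ∀ (nums1 : List Int) (nums2 : List Int) (i : Int) (j : Int), Dom_isGreater nums1 nums2 i j → Pre_isGreater nums1 nums2 i j → Spec_isGreater nums1 nums2 i j (isGreater nums1 nums2 i j)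

-- ===== LEMMAS AND PROOFS =====

theorem loop_eq_listGE (nums1 nums2 : List Int) :
    ∀ (k : Nat) (i j : Int), ((nums1.length : Int) - i).toNat = k → 0 ≤ i → 0 ≤ j →
      isGreaterLoop nums1 nums2 nums1.length nums2.length i j
        = listGE (nums1.drop i.toNat) (nums2.drop j.toNat) := by
  intro k
  induction k using Nat.strong_induction_on with
  | _ k ih =>
    intro i j hk hi hj
    rw [isGreaterLoop]
    by_cases h1 : (i : Int) < nums1.length
    · by_cases h2 : (j : Int) < nums2.length
      · -- both in range
        have hi' : i.toNat < nums1.length := by omega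
        have hj' : j.toNat < nums2.length := by omega
        rw [PySem.List.pyGet?_eq_some_getElem nums1 hi (by omega),
            PySem.List.pyGet?_eq_some_getElem nums2 hj (by omega)]
        rw [List.drop_eq_getElem_cons hi', List.drop_eq_getElem_cons hj']
        simp only [listGE]
        have hrec : isGreaterLoop nums1 nums2 nums1.length nums2.length (i + 1) (j + 1)
            = listGE (nums1.drop (i + 1).toNat) (nums2.drop (j + 1).toNat) :=
          ih ((nums1.length : Int) - (i + 1)).toNat (by omega) (i + 1) (j + 1) rfl
            (by omega) (by omega)
        have hi1 : (i + 1).toNat = i.toNat + 1 := by omega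
        have hj1 : (j + 1).toNat = j.toNat + 1 := by omega
        rw [hi1, hj1] at hrec
        simp only [if_pos (Or.inl h1), dif_neg (not_le.mpr h1),
          if_neg (not_le.mpr h2)]
        split_ifs with hgt hlt
        · rfl
        · rfl
        · exact hrec
      · -- j out of range: both branches true / listGE _ []
        have hd2 : nums2.drop j.toNat = [] := List.drop_eq_nil_of_le (by omega)
        by_cases h1' : (i : Int) ≥ nums1.length
        · omega
        · simp only [if_pos (Or.inl h1), dif_neg h1', if_pos (by omega : (j:Int) ≥ nums2.length), hd2]
          cases nums1.drop i.toNat <;> rfl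
    · by_cases h2 : (j : Int) < nums2.length
      · -- i out of range, j in range
        have hd1 : nums1.drop i.toNat = [] := List.drop_eq_nil_of_le (by omega)
        have hlen : (nums2.drop j.toNat).length = nums2.length - j.toNat := List.length_drop ..
        have hne : nums2.drop j.toNat ≠ [] := by
          intro h; rw [h] at hlen; simp at hlen; omega
        simp only [if_pos (Or.inr h2), dif_pos (by omega : (i:Int) ≥ nums1.length), hd1]
        cases hc : nums2.drop j.toNat with
        | nil => exact absurd hc hne
        | cons b bs => rfl
      · -- both out of range
        have hd1 : nums1.drop i.toNat = [] := List.drop_eq_nil_of_le (by omega)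
        have hd2 : nums2.drop j.toNat = [] := List.drop_eq_nil_of_le (by omega)
        simp only [if_neg (by omega : ¬ ((i:Int) < nums1.length ∨ (j:Int) < nums2.length)), hd1, hd2]
        rfl

theorem slice_from_nonneg (xs : List Int) (i : Int) (hi : 0 ≤ i) :
    PySem.List.slice xs (some i) none = xs.drop i.toNat := by
  conv_lhs => rw [show i = ((i.toNat : Nat) : Int) from (Int.toNat_of_nonneg hi).symm]
  rw [PySem.List.slice_from_natCast]

-- ===== VERDICT (by name: the statement is the Claim_ definition above) =====
theorem isGreater_spec : Claim_equal_isGreater := by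
  intro nums1 nums2 i j _ hpre
  obtain ⟨hi, hj⟩ := hpre
  unfold Spec_isGreater isGreater isGreater_alt
  rw [slice_from_nonneg nums1 i hi, slice_from_nonneg nums2 j hj]
  exact loop_eq_listGE nums1 nums2 _ i j rfl hi hj
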